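-- pv_equiv track=rewrite | github.com/endomorphosis/ipfs_datasets_py | ipfs_datasets_py/processors/legal_scrapers/federal_scrapers/us_code_scraper.py | _subsec_rank_map
-- ===== SOURCE A (Python) =====
-- from typing import Any, Dict, Iterator, List, Optional
--
-- def _subsec_rank_map(first_kind: str) -> Dict[str, int]:
--     sequence = [
--         "numeric",
--         "alpha_lower",
--         "alpha_upper",
--         "roman_lower",
--         "roman_upper",
--         "other",
--     ]
--     if first_kind in sequence:
--         idx = sequence.index(first_kind)
--         sequence = sequence[idx:] + sequence[:idx]
--     return {kind: rank + 1 for rank, kind in enumerate(sequence)}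
-- ===== SOURCE B (Python) =====
-- def _subsec_rank_map(first_kind: str) -> dict:
--     # Instead of slicing a rotated copy, rotate in place one step at a time
--     # (head -> tail) until the wanted kind is at the front, then assign ranks
--     # with an explicit accumulator loop.
--     seq = [
--         "numeric",
--         "alpha_lower",
--         "alpha_upper",
--         "roman_lower",
--         "roman_upper",
--         "other",
--     ]
--     if first_kind in seq:
--         while seq[0] != first_kind:
--             seq.append(seq.pop(0))
--     rank = {}
--     for kind in seq:
--         rank[kind] = len(rank) + 1
--     return rank
-- ===== Notes on version B (the rewrite author's own statement) =====
-- stated objective: alternative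
-- what changed: B replaces A's index/slice/concat rotation and enumerate-comprehension by an in-place while loop that moves the head to the tail one step at a time until the wanted kind is first, then assigns ranks with an explicit accumulator loop (rank[kind] = len(rank) + 1).
import Mathlib
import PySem

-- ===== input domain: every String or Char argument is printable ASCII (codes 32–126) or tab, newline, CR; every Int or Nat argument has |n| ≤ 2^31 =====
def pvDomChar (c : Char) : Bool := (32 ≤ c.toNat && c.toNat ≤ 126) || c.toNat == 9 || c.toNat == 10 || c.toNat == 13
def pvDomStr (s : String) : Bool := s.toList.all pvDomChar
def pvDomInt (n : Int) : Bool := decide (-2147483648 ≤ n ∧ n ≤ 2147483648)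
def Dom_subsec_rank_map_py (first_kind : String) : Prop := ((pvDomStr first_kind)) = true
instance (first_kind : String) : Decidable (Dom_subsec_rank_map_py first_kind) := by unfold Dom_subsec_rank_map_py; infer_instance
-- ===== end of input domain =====

-- B replaces A's slice-and-concat rotation by step-by-step head-to-tail rotation in a while
-- loop plus an explicit rank-accumulation loop (objective: alternative decomposition).

-- ===== PORT A =====
def subsec_rank_map_py (first_kind : String) : List (String × Int) :=
  let sequence : List String :=
    ["numeric", "alpha_lower", "alpha_upper", "roman_lower", "roman_upper", "other"]
  let sequence :=
    if first_kind ∈ sequence then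
      let idx : Nat := (PySem.List.index? sequence first_kind).getD 0
      PySem.List.slice sequence (some (idx : Int)) none ++
        PySem.List.slice sequence none (some (idx : Int))
    else sequence
  ((PySem.List.enumerate sequence 0).foldl
      (fun d p => d.insert p.2 (p.1 + 1)) PySem.Dict.empty).items

-- ===== PORT B =====
-- seq.append(seq.pop(0)): pop the head, append it at the end (seq is never empty here,
-- so pop?'s none branch is unreachable and leaves seq unchanged).
def pvRotStep (seq : List String) : List String :=
  match PySem.List.pop? seq 0 with
  | some (x, rest) => rest ++ [x]
  | none => seq

-- the Python 'while seq[0] != first_kind' loop; fuel 6 only bounds it (when first_kind is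
-- in the 6-element seq the guard fails within at most 5 iterations, as in the Python).
def pvRotWhile (fuel : Nat) (first_kind : String) (seq : List String) : List String :=
  match fuel with
  | 0 => seq
  | n + 1 =>
      if PySem.List.pyGetD seq 0 "" ≠ first_kind then
        pvRotWhile n first_kind (pvRotStep seq)
      else seq

def subsec_rank_map_py_alt (first_kind : String) : List (String × Int) :=
  let seq : List String :=
    ["numeric", "alpha_lower", "alpha_upper", "roman_lower", "roman_upper", "other"]
  let seq := if first_kind ∈ seq then pvRotWhile 6 first_kind seq else seq
  -- for kind in seq: rank[kind] = len(rank) + 1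
  (seq.foldl (fun d kind => d.insert kind ((d.items.length : Int) + 1)) PySem.Dict.empty).items

-- ===== PRECONDITION & SPEC =====
def Spec_subsec_rank_map_py (first_kind : String) (out : List (String × Int)) : Prop := out = subsec_rank_map_py_alt first_kind
instance (first_kind : String) (out : List (String × Int)) : Decidable (Spec_subsec_rank_map_py first_kind out) := by unfold Spec_subsec_rank_map_py; infer_instance

-- ===== CLAIM =====
def Claim_equal_subsec_rank_map_py : Prop := ∀ (first_kind : String), Dom_subsec_rank_map_py first_kind → Spec_subsec_rank_map_py first_kind (subsec_rank_map_py first_kind)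

-- ===== LEMMAS AND PROOFS =====

-- When first_kind is none of the six kinds, neither port rotates, and both loops
-- enumerate the original sequence in order.
theorem subsec_rank_map_notmem (fk : String)
    (h : fk ∉ (["numeric", "alpha_lower", "alpha_upper", "roman_lower", "roman_upper", "other"] : List String)) :
    subsec_rank_map_py fk = subsec_rank_map_py_alt fk := by
  unfold subsec_rank_map_py subsec_rank_map_py_alt
  simp only [if_neg h]
  rfl

-- ===== VERDICT =====
theorem subsec_rank_map_py_spec : Claim_equal_subsec_rank_map_py := by
  intro fk _
  unfold Spec_subsec_rank_map_py
  by_cases h1 : fk = "numeric"; · subst h1; decide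
  by_cases h2 : fk = "alpha_lower"; · subst h2; decide
  by_cases h3 : fk = "alpha_upper"; · subst h3; decide
  by_cases h4 : fk = "roman_lower"; · subst h4; decide
  by_cases h5 : fk = "roman_upper"; · subst h5; decide
  by_cases h6 : fk = "other"; · subst h6; decide
  exact subsec_rank_map_notmem fk (by simp [h1, h2, h3, h4, h5, h6])
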